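-- pv_equiv track=rewrite | github.com/JCapucho/universidade | 1ano1/FP/aula07/res/aula07e04.py | allMatches
-- ===== SOURCE A (Python) =====
-- def allMatches(teams):
--     assert len(teams) >= 2, "Requires two or more teams!"
--     games = []
--     for i, team in enumerate(teams):
--         for j, enemy in enumerate(teams):
--             if i != j:
--                 games.append((team, enemy))
--     return games
-- ===== SOURCE B (Python) =====
-- def allMatches(teams):
--     assert len(teams) >= 2, "Requires two or more teams!"
--     n = len(teams)
--     games = []
--     for k in range(n * (n - 1)):
--         i, j = divmod(k, n - 1)
--         if j >= i:
--             j += 1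
--         games.append((teams[i], teams[j]))
--     return games
-- ===== Notes on version B (the rewrite author's own statement) =====
-- stated objective: alternative
-- what changed: Replaces the nested enumerate loops with a single flat loop over range(n*(n-1)) that decodes each counter k arithmetically via divmod(k, n-1) into the pair of distinct positions (i, j), skipping the diagonal by the adjustment j += (j >= i) instead of any index-comparison filter.
import Mathlib
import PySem

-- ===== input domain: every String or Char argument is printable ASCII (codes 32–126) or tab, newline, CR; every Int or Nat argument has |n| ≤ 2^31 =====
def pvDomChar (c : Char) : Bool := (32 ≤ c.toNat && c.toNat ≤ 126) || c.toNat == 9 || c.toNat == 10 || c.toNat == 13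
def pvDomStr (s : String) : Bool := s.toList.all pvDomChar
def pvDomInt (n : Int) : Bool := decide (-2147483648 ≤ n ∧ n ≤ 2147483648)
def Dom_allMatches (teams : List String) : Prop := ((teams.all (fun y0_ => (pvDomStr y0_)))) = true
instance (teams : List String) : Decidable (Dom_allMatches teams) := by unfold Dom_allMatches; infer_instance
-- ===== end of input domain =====

-- B replaces the nested index loops by one flat counter loop decoded with divmod (alternative decomposition, same asymptotic cost, not claimed faster).


-- ===== PORT A =====
-- literal port of A: nested enumerate loops appending (team, enemy) when i != j
def allMatches (teams : List String) : List (String × String) :=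
  (PySem.List.enumerate teams).foldl
    (fun games p =>
      (PySem.List.enumerate teams).foldl
        (fun g q => if p.1 != q.1 then g ++ [(p.2, q.2)] else g)
        games)
    []

-- ===== PORT B =====
-- literal port of B: one loop over range(n*(n-1)); divmod(k, n-1) decodes (i, j), j skips the diagonal.
-- teams[i]/teams[j] ported with pyGetD: both indices are always in range here, where pyGetD is exact.
def allMatches_alt (teams : List String) : List (String × String) :=
  let n : Int := teams.length
  (PySem.List.pyRange 0 (n * (n - 1)) 1).foldl
    (fun games k =>
      let i := PySem.Int.floordiv k (n - 1)
      let j0 := PySem.Int.mod k (n - 1)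
      let j := if j0 ≥ i then j0 + 1 else j0
      games ++ [(PySem.List.pyGetD teams i "", PySem.List.pyGetD teams j "")])
    []

-- ===== PRECONDITION & SPEC =====
-- Pre_ excludes only the inputs on which A's assert raises AssertionError: fewer than two teams.
def Pre_allMatches (teams : List String) : Prop := 2 ≤ teams.length
instance (teams : List String) : Decidable (Pre_allMatches teams) := by unfold Pre_allMatches; infer_instance
def pvWitness_allMatches : List String := ["porto", "benfica"]
def Spec_allMatches (teams : List String) (out : List (String × String)) : Prop := out = allMatches_alt teams
instance (teams : List String) (out : List (String × String)) : Decidable (Spec_allMatches teams out) := by unfold Spec_allMatches; infer_instance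

-- ===== CLAIM (what is proved, stated in full; the proofs are below) =====
def Claim_equal_allMatches : Prop := ∀ (teams : List String), Dom_allMatches teams → Pre_allMatches teams → Spec_allMatches teams (allMatches teams)

-- ===== LEMMAS AND PROOFS =====

-- both sides are shown equal to this canonical form: for each position i, the block of its games
def pvCanon (teams : List String) : List (String × String) :=
  (List.range teams.length).flatMap
    (fun i => (teams.take i ++ teams.drop (i + 1)).map (fun e => (teams.getD i "", e)))

-- filtering an enumeration (start s) by "index ≠ s+k" and projecting removes exactly position k
lemma filter_enumerate_ne {α : Type} (xs : List α) (s k : Nat) :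
    ((PySem.List.enumerate xs (s : Int)).filter
        (fun q => ((s : Int) + (k : Int)) != q.1)).map Prod.snd
      = xs.take k ++ xs.drop (k + 1) := by
  induction xs generalizing s k with
  | nil => simp [PySem.List.enumerate_nil]
  | cons x xs ih =>
    rw [PySem.List.enumerate_cons]
    cases k with
    | zero =>
      simp only [List.filter_cons]
      have h0 : ((((s : Int) + ((0 : Nat) : Int)) != ((s : Int), x).1)) = false := by simp
      rw [h0]
      simp only [Bool.false_eq_true, if_false]
      have hall : (PySem.List.enumerate xs ((s : Int) + 1)).filter
          (fun q => ((s : Int) + ((0 : Nat) : Int)) != q.1)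
          = PySem.List.enumerate xs ((s : Int) + 1) := by
        apply List.filter_eq_self.mpr
        intro q hq
        rcases (PySem.List.mem_enumerate_iff _ _ _).mp hq with ⟨j, hj, rfl⟩
        simp only [Nat.cast_zero, add_zero, bne_iff_ne, ne_eq]
        omega
      rw [hall, PySem.List.map_snd_enumerate]
      simp
    | succ m =>
      simp only [List.filter_cons]
      have h1 : ((((s : Int) + ((m + 1 : Nat) : Int)) != ((s : Int), x).1)) = true := by
        simp only [bne_iff_ne, ne_eq]
        push_cast
        omega
      rw [h1, if_pos rfl]
      have hc : (fun q : Int × α => ((s : Int) + ((m + 1 : Nat) : Int)) != q.1)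
          = (fun q : Int × α => (((s + 1 : Nat) : Int) + ((m : Nat) : Int)) != q.1) := by
        funext q
        have : ((s : Int) + ((m + 1 : Nat) : Int)) = (((s + 1 : Nat) : Int) + ((m : Nat) : Int)) := by
          push_cast; ring
        rw [this]
      have hs : ((s : Int) + 1) = (((s + 1 : Nat) : Int)) := by push_cast; ring
      rw [List.map_cons, hs, hc, ih (s + 1) m]
      simp

-- the inner loop of A, run from acc for entry (k, team), appends exactly the block of position k
lemma inner_eq (teams : List String) (k : Nat) (team : String) (acc : List (String × String)) :
    (PySem.List.enumerate teams).foldl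
        (fun g q => if ((k : Nat) : Int) != q.1 then g ++ [(team, q.2)] else g) acc
      = acc ++ (teams.take k ++ teams.drop (k + 1)).map (fun e => (team, e)) := by
  rw [PySem.List.foldl_append_if (p := fun q : Int × String => ((k : Nat) : Int) != q.1)
      (f := fun q : Int × String => (team, q.2))]
  congr 1
  have hf := filter_enumerate_ne teams 0 k
  simp only [Nat.cast_zero, zero_add] at hf
  calc ((PySem.List.enumerate teams).filter (fun q => ((k : Nat) : Int) != q.1)).map
          (fun q : Int × String => (team, q.2))
      = (((PySem.List.enumerate teams).filter (fun q => ((k : Nat) : Int) != q.1)).map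
          Prod.snd).map (fun e => (team, e)) := by simp [List.map_map]
    _ = (teams.take k ++ teams.drop (k + 1)).map (fun e => (team, e)) := by rw [hf]

-- A equals the canonical form
lemma a_eq_canon (teams : List String) : allMatches teams = pvCanon teams := by
  unfold allMatches pvCanon
  have hbody : ∀ (games : List (String × String)) (p : Int × String),
      p ∈ PySem.List.enumerate teams →
      (PySem.List.enumerate teams).foldl
        (fun g q => if p.1 != q.1 then g ++ [(p.2, q.2)] else g) games
      = games ++ (teams.take p.1.toNat ++ teams.drop (p.1.toNat + 1)).map
          (fun e => (p.2, e)) := by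
    intro games p hp
    rcases (PySem.List.mem_enumerate_iff _ _ _).mp hp with ⟨j, hj, rfl⟩
    simpa using inner_eq teams j teams[j] games
  rw [PySem.List.foldl_congr_mem (PySem.List.enumerate teams)
      (fun games p =>
        (PySem.List.enumerate teams).foldl
          (fun g q => if p.1 != q.1 then g ++ [(p.2, q.2)] else g) games)
      (fun games p => games ++ (teams.take p.1.toNat ++ teams.drop (p.1.toNat + 1)).map
          (fun e => (p.2, e)))
      [] (fun acc x hx => hbody acc x hx),
    PySem.List.foldl_append_eq_flatMap]
  rw [PySem.List.enumerate_eq_map_pyRange teams "", PySem.List.len_eq,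
    PySem.List.pyRange_zero_natCast, List.map_map, List.flatMap_map, List.nil_append]
  apply List.flatMap_congr
  intro i hi
  simp only [Function.comp, PySem.List.pyGetD_natCast, Int.toNat_natCast]

-- decode: Nat.range product decomposition of a flat range
lemma range_mul_flatMap (a b : Nat) :
    List.range (a * b) = (List.range a).flatMap (fun i => (List.range b).map (fun j => i * b + j)) := by
  induction a with
  | zero => simp
  | succ a ih =>
    rw [Nat.succ_mul, List.range_add, ih, List.range_succ, List.flatMap_append]
    simp

-- B equals the canonical form
lemma b_eq_canon (teams : List String) (h : 2 ≤ teams.length) :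
    allMatches_alt teams = pvCanon teams := by
  unfold allMatches_alt pvCanon
  simp only
  set L := teams.length with hL
  have hcast : ((L : Int) * ((L : Int) - 1)) = ((L * (L - 1) : Nat) : Int) := by
    push_cast [Nat.cast_sub (by omega : 1 ≤ L)]; ring
  rw [PySem.List.foldl_append_singleton_eq_map, List.nil_append, hcast,
    PySem.List.pyRange_zero_natCast, List.map_map, range_mul_flatMap L (L - 1),
    List.map_flatMap]
  apply List.flatMap_congr
  intro i hi
  have hiL : i < L := List.mem_range.mp hi
  apply List.ext_getElem
  · simp; omega
  · intro k hk1 hk2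
    have hkb : k < L - 1 := by simpa using hk1
    simp only [List.getElem_map, List.getElem_range, Function.comp]
    have hm1 : ((L : Int) - 1) = (((L - 1 : Nat)) : Int) := by
      push_cast [Nat.cast_sub (by omega : 1 ≤ L)]; ring
    have hdiv : PySem.Int.floordiv ((i * (L - 1) + k : Nat) : Int) ((L : Int) - 1)
        = ((i : Nat) : Int) := by
      rw [hm1, PySem.Int.floordiv_natCast]
      congr 1
      rw [Nat.mul_comm i (L - 1), Nat.mul_add_div (by omega), Nat.div_eq_of_lt hkb]
      omega
    have hmod : PySem.Int.mod ((i * (L - 1) + k : Nat) : Int) ((L : Int) - 1)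
        = ((k : Nat) : Int) := by
      rw [hm1, PySem.Int.mod_natCast]
      congr 1
      rw [Nat.mul_comm i (L - 1), Nat.mul_add_mod, Nat.mod_eq_of_lt hkb]
    rw [hdiv, hmod]
    -- resolve the diagonal-skip branch and both indexings
    by_cases hij : i ≤ k
    · have hge : (((k : Nat) : Int) ≥ ((i : Nat) : Int)) := by exact_mod_cast hij
      rw [if_pos hge]
      have : (((k : Nat) : Int) + 1) = (((k + 1 : Nat)) : Int) := by push_cast; ring
      rw [this, PySem.List.pyGetD_natCast, PySem.List.pyGetD_natCast]
      -- position k ≥ i lands in the drop-part of the block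
      rw [List.getElem_append_right (by simp; omega)]
      simp only [List.length_take]
      rw [List.getElem_drop]
      have hidx : i + 1 + (k - min i teams.length) = k + 1 := by omega
      simp only [hidx]
      rw [List.getD_eq_getElem teams "" (by omega : k + 1 < teams.length)]
    · have hge : ¬ (((k : Nat) : Int) ≥ ((i : Nat) : Int)) := by
        simp only [ge_iff_le, Nat.cast_le]; omega
      rw [if_neg hge, PySem.List.pyGetD_natCast, PySem.List.pyGetD_natCast]
      rw [List.getElem_append_left (by simp; omega)]
      rw [List.getElem_take, List.getD_eq_getElem teams "" (by omega : k < teams.length)]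

-- ===== VERDICT (by name: the statement is the Claim_ definition above) =====
theorem allMatches_spec : Claim_equal_allMatches := by
  intro teams _ hpre
  unfold Spec_allMatches
  rw [a_eq_canon, b_eq_canon teams hpre]
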